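-- pv_equiv track=rewrite | github.com/hzuppur/DJNATOR | generate_metadata.py | get_bass_level_change
-- ===== SOURCE A (Python) =====
-- def get_bass_level_change(bass_vec, beat_times, beat_change_lim):
--     indexes_to_add = [0]  # Add first beat
--     prev_i = 0
--     current_range = []
--
--     for i in range(1, len(bass_vec)):
--         if bass_vec[i - 1] != bass_vec[i]:
--             if i - prev_i < beat_change_lim:
--                 current_range.append(i)
--             else:
--                 if len(current_range) > 2:
--                     for j in current_range[1:-1]:
--                         indexes_to_add.remove(j - 1)
--                 current_range = [i]
--             # Dond add first beat twice
--             if i - 1 != 0: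
--                 indexes_to_add.append(i - 1)
--
--             prev_i = i
--
--     if len(current_range) > 2:
--         for j in current_range[1:-1]:
--             indexes_to_add.remove(j - 1)
--     bass_level_change = [beat_times[i] for i in indexes_to_add]
--     bass_level_change.append(beat_times[-1])
--     return bass_level_change
-- ===== SOURCE B (Python) =====
-- def get_bass_level_change(bass_vec, beat_times, beat_change_lim):
--     # Same beats, computed by grouping change indices into runs instead of
--     # appending-then-removing middles from the output list.
--     changes = [i for i in range(1, len(bass_vec)) if bass_vec[i - 1] != bass_vec[i]]
--     runs = []
--     cur = []
--     prev = 0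
--     for c in changes:
--         if cur and c - prev < beat_change_lim:
--             cur.append(c)
--         else:
--             if cur:
--                 runs.append(cur)
--             cur = [c]
--         prev = c
--     if cur:
--         runs.append(cur)
--     indexes = [0]
--     for run in runs:
--         sel = run if len(run) <= 2 else [run[0], run[-1]]
--         indexes.extend(c - 1 for c in sel if c != 1)
--     out = [beat_times[i] for i in indexes]
--     out.append(beat_times[-1])
--     return out
-- ===== Notes on version B (the rewrite author's own statement) =====
-- stated objective: simpler
-- what changed: B first builds the list of bass-change indices, groups them into runs by the beat_change_lim gap, and keeps each run's first and last index, instead of A's appending every index to the output and later deleting run middles with repeated list.remove scans.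
import Mathlib
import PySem

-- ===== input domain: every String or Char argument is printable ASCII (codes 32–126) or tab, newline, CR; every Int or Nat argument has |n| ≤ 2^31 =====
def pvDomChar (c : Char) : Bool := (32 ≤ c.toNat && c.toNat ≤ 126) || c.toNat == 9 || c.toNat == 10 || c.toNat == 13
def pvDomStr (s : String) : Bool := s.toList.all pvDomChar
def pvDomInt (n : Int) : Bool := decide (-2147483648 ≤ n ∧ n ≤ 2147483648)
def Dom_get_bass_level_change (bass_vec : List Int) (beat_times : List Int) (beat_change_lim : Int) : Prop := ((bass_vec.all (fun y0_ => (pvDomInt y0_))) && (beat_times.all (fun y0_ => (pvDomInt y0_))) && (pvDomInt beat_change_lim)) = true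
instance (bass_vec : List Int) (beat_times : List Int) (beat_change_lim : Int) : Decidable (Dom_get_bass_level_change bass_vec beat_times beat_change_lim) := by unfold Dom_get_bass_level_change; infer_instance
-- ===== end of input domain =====

-- B rebuilds the same beat list by grouping change indices into runs up front instead of
-- A's append-then-remove edits of the output list (objective: simpler decomposition; same cost).

-- ===== PORT A =====
-- indexes_to_add.remove(j - 1): Python raises ValueError if absent; on A's reachable states the
-- value is always present (proved implicitly by the equivalence), so the .getD fallback is never hit.
def pvRemoveD (l : List Int) (x : Int) : List Int := (PySem.List.remove? l x).getD l

-- the repeated flush block: 'if len(current_range) > 2: for j in current_range[1:-1]: indexes_to_add.remove(j - 1)'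
def pvFlushA (idx run : List Int) : List Int :=
  if run.length > 2 then
    (PySem.List.slice run (some 1) (some (-1))).foldl (fun a j => pvRemoveD a (j - 1)) idx
  else idx

-- the body of A's 'for i in range(1, len(bass_vec))' loop; state = (indexes_to_add, prev_i, current_range)
def pvStepA (bass_vec : List Int) (lim : Int) (s : List Int × Int × List Int) (i : Int) :
    List Int × Int × List Int :=
  if PySem.List.pyGetD bass_vec (i - 1) 0 ≠ PySem.List.pyGetD bass_vec i 0 then
    let p := if i - s.2.1 < lim then (s.1, s.2.2 ++ [i]) else (pvFlushA s.1 s.2.2, [i])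
    (if i - 1 ≠ 0 then p.1 ++ [i - 1] else p.1, i, p.2)
  else s

def get_bass_level_change (bass_vec : List Int) (beat_times : List Int) (beat_change_lim : Int) : List Int :=
  let st := (PySem.List.pyRange 1 (bass_vec.length : Int) 1).foldl
      (pvStepA bass_vec beat_change_lim) ([0], 0, [])
  let idx := pvFlushA st.1 st.2.2
  -- beat_times[i] / beat_times[-1]: Pre_ guarantees the index is in range, so the default is never hit
  idx.map (fun i => PySem.List.pyGetD beat_times i 0) ++ [PySem.List.pyGetD beat_times (-1) 0]

-- ===== PORT B =====
-- 'run if len(run) <= 2 else [run[0], run[-1]]'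
def pvSel (run : List Int) : List Int :=
  if run.length ≤ 2 then run else [PySem.List.pyGetD run 0 0, PySem.List.pyGetD run (-1) 0]

-- '(c - 1 for c in sel if c != 1)'
def pvAdds (sel : List Int) : List Int := (sel.filter (fun c => c != 1)).map (fun c => c - 1)

-- the body of B's grouping loop; state = (runs, cur, prev)
def pvStepB (lim : Int) (s : List (List Int) × List Int × Int) (c : Int) :
    List (List Int) × List Int × Int :=
  if s.2.1 ≠ [] ∧ c - s.2.2 < lim then (s.1, s.2.1 ++ [c], c)
  else ((if s.2.1 ≠ [] then s.1 ++ [s.2.1] else s.1), [c], c)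

def get_bass_level_change_alt (bass_vec : List Int) (beat_times : List Int) (beat_change_lim : Int) : List Int :=
  let changes := (PySem.List.pyRange 1 (bass_vec.length : Int) 1).filter
      (fun i => decide (PySem.List.pyGetD bass_vec (i - 1) 0 ≠ PySem.List.pyGetD bass_vec i 0))
  let st := changes.foldl (pvStepB beat_change_lim) ([], [], 0)
  let runs := if st.2.1 ≠ [] then st.1 ++ [st.2.1] else st.1
  let indexes := runs.foldl (fun acc run => acc ++ pvAdds (pvSel run)) [0]
  indexes.map (fun i => PySem.List.pyGetD beat_times i 0) ++ [PySem.List.pyGetD beat_times (-1) 0]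

-- ===== PRECONDITION & SPEC =====
-- Exactly the inputs on which the Python A returns: beat_times nonempty (beat_times[-1]) and every
-- bass-level change index i has i - 1 < len(beat_times) (else beat_times[i-1] raises IndexError;
-- the largest change index is always kept, so this is not narrower than A's return set).
def Pre_get_bass_level_change (bass_vec : List Int) (beat_times : List Int) (beat_change_lim : Int) : Prop :=
  beat_times ≠ [] ∧ ∀ i ∈ PySem.List.pyRange 1 (bass_vec.length : Int) 1,
    PySem.List.pyGetD bass_vec (i - 1) 0 ≠ PySem.List.pyGetD bass_vec i 0 → i ≤ (beat_times.length : Int)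
instance (bass_vec : List Int) (beat_times : List Int) (beat_change_lim : Int) : Decidable (Pre_get_bass_level_change bass_vec beat_times beat_change_lim) := by unfold Pre_get_bass_level_change; infer_instance

def pvWitness_get_bass_level_change : List Int × List Int × Int := ([0, 1, 1, 0], [10, 20, 30, 40], 2)

def Spec_get_bass_level_change (bass_vec : List Int) (beat_times : List Int) (beat_change_lim : Int) (out : List Int) : Prop := out = get_bass_level_change_alt bass_vec beat_times beat_change_lim
instance (bass_vec : List Int) (beat_times : List Int) (beat_change_lim : Int) (out : List Int) : Decidable (Spec_get_bass_level_change bass_vec beat_times beat_change_lim out) := by unfold Spec_get_bass_level_change; infer_instance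

-- ===== CLAIM (what is proved, stated in full; the proofs are below) =====
def Claim_equal_get_bass_level_change : Prop := ∀ (bass_vec : List Int) (beat_times : List Int) (beat_change_lim : Int), Dom_get_bass_level_change bass_vec beat_times beat_change_lim → Pre_get_bass_level_change bass_vec beat_times beat_change_lim → Spec_get_bass_level_change bass_vec beat_times beat_change_lim (get_bass_level_change bass_vec beat_times beat_change_lim)

-- ===== LEMMAS AND PROOFS =====

-- the common abstract recursion both loops compute: process the remaining change indices,
-- flushing the pending run (keep pvSel of it) whenever the gap from the previous change is ≥ lim
def pvG (lim : Int) : List Int → Int → List Int → List Int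
  | [], _, run => pvAdds (pvSel run)
  | c :: cs, prev, run =>
      if c - prev < lim then pvG lim cs c (run ++ [c])
      else pvAdds (pvSel run) ++ pvG lim cs c [c]

theorem pvRemove?_of_mem (x : Int) (t : List Int) (h : x ∈ t) :
    PySem.List.remove? t x = some (t.erase x) := by
  induction t with
  | nil => cases h
  | cons a t ih =>
    by_cases hx : x = a
    · subst hx; simp [PySem.List.remove?, List.idxOf?_cons]
    · have hm : x ∈ t := by simpa [hx] using h
      have h2 := ih hm
      unfold PySem.List.remove? at h2 ⊢
      rw [List.idxOf?_cons]
      simp only [beq_iff_eq, Ne.symm hx, if_false]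
      cases he : List.idxOf? x t with
      | none => rw [he] at h2; simp at h2
      | some k =>
        rw [he] at h2; simp at h2
        rw [List.erase_cons_tail (by simp [Ne.symm hx])]
        simp [List.eraseIdx_cons_succ, h2]

theorem pvRemoveD_of_mem (x : Int) (t : List Int) (h : x ∈ t) : pvRemoveD t x = t.erase x := by
  simp [pvRemoveD, pvRemove?_of_mem x t h]

theorem pvSlice_one_neg_one (h : Int) (t : List Int) :
    PySem.List.slice (h :: t) (some 1) (some (-1)) = t.dropLast := by
  simp [PySem.List.slice, PySem.List.clampIdx, show ¬((t.length : Int) < 0) from by omega,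
    List.dropLast_eq_take]

theorem pvAdds_append (a b : List Int) : pvAdds (a ++ b) = pvAdds a ++ pvAdds b := by
  simp [pvAdds]

theorem pvSel_subset (run : List Int) : ∀ d ∈ pvSel run, d ∈ run := by
  intro d hd
  unfold pvSel at hd
  split at hd
  · exact hd
  · next hlen =>
    have hne : run ≠ [] := by rintro rfl; simp at hlen
    have hpos : 0 < run.length := List.length_pos_iff.mpr hne
    rcases List.mem_pair.1 hd with rfl | rfl
    · exact PySem.List.pyGetD_mem run 0 (by simp [PySem.Raise.InRange]; omega)
    · exact PySem.List.pyGetD_mem run 0 (by simp [PySem.Raise.InRange]; omega)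

theorem pvMem_adds (x : Int) (sel : List Int) :
    x ∈ pvAdds sel ↔ ∃ d ∈ sel, d ≠ 1 ∧ x = d - 1 := by
  simp [pvAdds, List.mem_filter, List.mem_map]
  constructor
  · rintro ⟨d, ⟨hd, hne⟩, rfl⟩; exact ⟨d, hd, by simpa using hne, rfl⟩
  · rintro ⟨d, hd, hne, rfl⟩; exact ⟨d, ⟨hd, by simpa using hne⟩, rfl⟩

-- removing each middle value (present exactly once, in the middle segment) restores L ++ R
theorem pvFoldl_remove_sandwich (ms : List Int) : ∀ (L R : List Int),
    (∀ j ∈ ms, (j - 1) ∉ L) → (ms.map (fun j => j - 1)).Nodup →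
    ms.foldl (fun a j => pvRemoveD a (j - 1)) (L ++ ms.map (fun j => j - 1) ++ R) = L ++ R := by
  induction ms with
  | nil => intro L R _ _; simp
  | cons j ms ih =>
    intro L R hL hnd
    have hmem : (j - 1) ∈ L ++ (j - 1) :: ms.map (fun j => j - 1) ++ R := by simp
    simp only [List.map_cons, List.foldl_cons]
    rw [show (L ++ ((j-1) :: ms.map (fun j => j - 1)) ++ R)
        = L ++ ((j-1) :: (ms.map (fun j => j - 1) ++ R)) by simp]
    rw [pvRemoveD_of_mem _ _ (by simp)]
    rw [List.erase_append_right _ (hL j (by simp)), List.erase_cons_head]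
    rw [show L ++ (ms.map (fun j => j - 1) ++ R) = L ++ ms.map (fun j => j - 1) ++ R by simp]
    exact ih L R (fun a ha => hL a (List.mem_cons_of_mem _ ha)) (by simp at hnd; exact hnd.2)

-- flushing A's pending run from the end of the output = keeping pvSel of the run
theorem pvFlushA_eq (pfx run : List Int) (hpw : run.Pairwise (· < ·))
    (h1 : ∀ c ∈ run, 1 ≤ c) (hp : ∀ x ∈ pfx, ∀ c ∈ run, x < c) :
    pvFlushA (pfx ++ pvAdds run) run = pfx ++ pvAdds (pvSel run) := by
  unfold pvFlushA pvSel
  by_cases hlen : run.length > 2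
  · rw [if_pos hlen, if_neg (by omega)]
    match run, hlen, hpw, h1, hp with
    | h :: t, hlen, hpw, h1, hp =>
      rcases List.eq_nil_or_concat t with rfl | ⟨m, l, ht⟩
      · simp at hlen
      rw [List.concat_eq_append] at ht
      subst ht
      have hpw' := List.pairwise_cons.1 hpw
      have ht2 : ∀ c ∈ m ++ [l], 2 ≤ c := by
        intro c hc
        have := hpw'.1 c hc
        have := h1 h (by simp)
        omega
      have haddsT : pvAdds (m ++ [l]) = (m ++ [l]).map (fun c => c - 1) := by
        unfold pvAdds
        congr 1
        rw [List.filter_eq_self]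
        intro c hc
        have := ht2 c hc
        simp; omega
      rw [pvSlice_one_neg_one, List.dropLast_concat]
      have hkey : pfx ++ pvAdds (h :: (m ++ [l]))
          = (pfx ++ pvAdds [h]) ++ m.map (fun j => j - 1) ++ [l - 1] := by
        rw [show (h :: (m ++ [l])) = [h] ++ (m ++ [l]) by simp, pvAdds_append, haddsT]
        simp
      rw [hkey]
      rw [pvFoldl_remove_sandwich]
      · rw [show (h :: (m ++ [l])) = (h :: m) ++ [l] by simp,
          PySem.List.pyGetD_neg_one_append_singleton]
        rw [show ((h :: m) ++ [l] : List Int) = h :: (m ++ [l]) by simp,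
          PySem.List.pyGetD_zero_cons]
        have hl2 : 2 ≤ l := ht2 l (by simp)
        have hladd : pvAdds [l] = [l - 1] := by
          unfold pvAdds
          have : (l != 1) = true := by simp; omega
          simp [this]
        rw [show ([h, l] : List Int) = [h] ++ [l] by simp, pvAdds_append, hladd]
        simp
      · intro j hj
        have hjt : j ∈ m ++ [l] := by simp [hj]
        have hhj : h < j := hpw'.1 j hjt
        simp only [List.mem_append]
        rintro (hx | hx)
        · have := hp _ hx h (by simp); omega
        · rw [pvMem_adds] at hx
          rcases hx with ⟨d, hd, _, he⟩
          simp at hd; subst hd; omega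
      · have hmpw : m.Pairwise (· < ·) := (List.pairwise_append.1 hpw'.2).1
        have hm2 : (m.map (fun j => j - 1)).Pairwise (· < ·) := by
          rw [List.pairwise_map]
          exact hmpw.imp (by intro a b hab; omega)
        exact hm2.imp (fun hab => by omega)
  · rw [if_neg hlen, if_pos (by omega)]

theorem pvAdds_singleton (c : Int) : pvAdds [c] = if c - 1 ≠ 0 then [c - 1] else [] := by
  unfold pvAdds
  by_cases hc : c = 1
  · subst hc; simp
  · have h1 : (c != 1) = true := by simp [hc]
    have h2 : c - 1 ≠ 0 := by omega
    simp [h1, h2]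

-- the loop body of A on a change index (the branch test already taken)
def pvInner (lim : Int) (s : List Int × Int × List Int) (c : Int) : List Int × Int × List Int :=
  let p := if c - s.2.1 < lim then (s.1, s.2.2 ++ [c]) else (pvFlushA s.1 s.2.2, [c])
  (if c - 1 ≠ 0 then p.1 ++ [c - 1] else p.1, c, p.2)

theorem pvStepA_eq (bv : List Int) (lim : Int) :
    pvStepA bv lim = fun s i =>
      if PySem.List.pyGetD bv (i - 1) 0 ≠ PySem.List.pyGetD bv i 0 then pvInner lim s i
      else s := by
  funext s i
  simp [pvStepA, pvInner]

-- A's loop, restricted to the change indices, turns the prefix-plus-pending-run state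
-- into prefix ++ pvG
theorem pvA_loop (lim : Int) (cs : List Int) : ∀ (pfx run : List Int) (prev : Int),
    (run ++ cs).Pairwise (· < ·) → (∀ c ∈ run ++ cs, 1 ≤ c) →
    (∀ x ∈ pfx, ∀ c ∈ run ++ cs, x < c) →
    pvFlushA (cs.foldl (pvInner lim) (pfx ++ pvAdds run, prev, run)).1
        (cs.foldl (pvInner lim) (pfx ++ pvAdds run, prev, run)).2.2
      = pfx ++ pvG lim cs prev run := by
  induction cs with
  | nil =>
    intro pfx run prev hpw h1 hp
    simp only [List.foldl_nil, pvG]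
    exact pvFlushA_eq pfx run (by simpa using hpw) (by simpa using h1)
      (fun x hx c hc => hp x hx c (by simp [hc]))
  | cons c cs ih =>
    intro pfx run prev hpw h1 hp
    have hrw : run ++ c :: cs = (run ++ [c]) ++ cs := by simp
    by_cases hlt : c - prev < lim
    · have hstep : pvInner lim (pfx ++ pvAdds run, prev, run) c
          = (pfx ++ pvAdds (run ++ [c]), c, run ++ [c]) := by
        simp only [pvInner, if_pos hlt]
        rw [pvAdds_append, pvAdds_singleton]
        by_cases hc : c - 1 = 0 <;> simp [hc]
      simp only [List.foldl_cons, hstep]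
      rw [show pvG lim (c :: cs) prev run = pvG lim cs c (run ++ [c]) from by
        rw [pvG]; rw [if_pos hlt]]
      exact ih pfx (run ++ [c]) c (by rw [← hrw]; exact hpw) (by rw [← hrw]; exact h1)
        (fun x hx d hd => hp x hx d (by rw [hrw]; exact hd))
    · have hflush : pvFlushA (pfx ++ pvAdds run) run = pfx ++ pvAdds (pvSel run) := by
        have hsub : run.Sublist (run ++ c :: cs) := List.sublist_append_left _ _
        exact pvFlushA_eq pfx run (hpw.sublist hsub)
          (fun d hd => h1 d (by simp [hd]))
          (fun x hx d hd => hp x hx d (by simp [hd]))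
      have hstep : pvInner lim (pfx ++ pvAdds run, prev, run) c
          = ((pfx ++ pvAdds (pvSel run)) ++ pvAdds [c], c, [c]) := by
        simp only [pvInner, if_neg hlt]
        rw [hflush, pvAdds_singleton]
        by_cases hc : c - 1 = 0 <;> simp [hc]
      simp only [List.foldl_cons, hstep]
      rw [show pvG lim (c :: cs) prev run = pvAdds (pvSel run) ++ pvG lim cs c [c] from by
        rw [pvG]; rw [if_neg hlt]]
      have hcross := (List.pairwise_append.1 hpw).2.2
      have hrest := (List.Pairwise.sublist (List.sublist_append_right run _) hpw)
      have := ih (pfx ++ pvAdds (pvSel run)) [c] c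
        (by simpa using hrest)
        (by intro d hd; exact h1 d (by simp at hd ⊢; tauto))
        (by
          intro x hx d hd
          have hd' : d ∈ c :: cs := by simpa using hd
          rcases List.mem_append.1 hx with hx | hx
          · exact hp x hx d (by simp at hd' ⊢; tauto)
          · rw [pvMem_adds] at hx
            rcases hx with ⟨e, he, _, rfl⟩
            have : e < d := hcross e (pvSel_subset run e he) d hd'
            omega)
      rw [this, List.append_assoc]

-- B's grouping loop: flushed runs, flat-mapped through keep-first-and-last, compute pvG
theorem pvB_runs (lim : Int) (cs : List Int) : ∀ (racc : List (List Int)) (cur : List Int) (prev : Int),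
    (if (cs.foldl (pvStepB lim) (racc, cur, prev)).2.1 ≠ []
      then (cs.foldl (pvStepB lim) (racc, cur, prev)).1 ++ [(cs.foldl (pvStepB lim) (racc, cur, prev)).2.1]
      else (cs.foldl (pvStepB lim) (racc, cur, prev)).1).flatMap (fun r => pvAdds (pvSel r))
    = racc.flatMap (fun r => pvAdds (pvSel r)) ++ pvG lim cs prev cur := by
  induction cs with
  | nil =>
    intro racc cur prev
    simp only [List.foldl_nil, pvG]
    by_cases hc : cur = []
    · simp [hc, pvSel, pvAdds]
    · simp [hc]
  | cons c cs ih =>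
    intro racc cur prev
    by_cases hcur : cur ≠ [] ∧ c - prev < lim
    · have hstep : pvStepB lim (racc, cur, prev) c = (racc, cur ++ [c], c) := by
        simp [pvStepB, hcur]
      simp only [List.foldl_cons, hstep]
      rw [ih, show pvG lim (c :: cs) prev cur = pvG lim cs c (cur ++ [c]) from by
        rw [pvG]; rw [if_pos hcur.2]]
    · by_cases hlt : c - prev < lim
      · have hnil : cur = [] := by tauto
        have hstep : pvStepB lim (racc, cur, prev) c = (racc, [c], c) := by
          simp [pvStepB, hnil]
        simp only [List.foldl_cons, hstep]
        rw [ih, show pvG lim (c :: cs) prev cur = pvG lim cs c (cur ++ [c]) from by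
          rw [pvG]; rw [if_pos hlt], hnil]
        simp
      · have hstep : pvStepB lim (racc, cur, prev) c
            = ((if cur ≠ [] then racc ++ [cur] else racc), [c], c) := by
          simp [pvStepB, hlt]
        simp only [List.foldl_cons, hstep]
        rw [ih, show pvG lim (c :: cs) prev cur = pvAdds (pvSel cur) ++ pvG lim cs c [c] from by
          rw [pvG]; rw [if_neg hlt]]
        by_cases hc : cur = []
        · simp [hc, pvSel, pvAdds]
        · simp [hc, List.append_assoc]

-- the two ports agree everywhere (even without Pre_: both use the same in-range defaults)
theorem pvPorts_eq (bv bt : List Int) (lim : Int) :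
    get_bass_level_change bv bt lim = get_bass_level_change_alt bv bt lim := by
  simp only [get_bass_level_change, get_bass_level_change_alt]
  rw [pvStepA_eq, PySem.List.foldl_ite_eq_foldl_filter]
  have hCpw : ((PySem.List.pyRange 1 (bv.length : Int) 1).filter
      (fun i => decide (PySem.List.pyGetD bv (i - 1) 0 ≠ PySem.List.pyGetD bv i 0))).Pairwise (· < ·) :=
    (PySem.List.pairwise_lt_pyRange_one 1 (bv.length : Int)).filter _
  have hC1 : ∀ c ∈ (PySem.List.pyRange 1 (bv.length : Int) 1).filter
      (fun i => decide (PySem.List.pyGetD bv (i - 1) 0 ≠ PySem.List.pyGetD bv i 0)), 1 ≤ c := by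
    intro c hc
    have := (List.mem_filter.1 hc).1
    exact (PySem.List.mem_pyRange_one.1 this).1
  have hA := pvA_loop lim ((PySem.List.pyRange 1 (bv.length : Int) 1).filter
      (fun i => decide (PySem.List.pyGetD bv (i - 1) 0 ≠ PySem.List.pyGetD bv i 0))) [0] [] 0
    (by simpa using hCpw) (by simpa using hC1)
    (by intro x hx c hc; simp at hx; subst hx; have := hC1 c (by simpa using hc); omega)
  simp only [pvAdds, List.filter_nil, List.map_nil, List.append_nil] at hA
  rw [hA]
  have hB := pvB_runs lim ((PySem.List.pyRange 1 (bv.length : Int) 1).filter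
      (fun i => decide (PySem.List.pyGetD bv (i - 1) 0 ≠ PySem.List.pyGetD bv i 0))) [] [] 0
  rw [PySem.List.foldl_append_eq_flatMap, hB]
  simp

-- ===== VERDICT (by name: the statement is the Claim_ definition above) =====
theorem get_bass_level_change_spec : Claim_equal_get_bass_level_change := by
  intro bass_vec beat_times beat_change_lim _ _
  unfold Spec_get_bass_level_change
  exact pvPorts_eq bass_vec beat_times beat_change_lim
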